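-- pv_equiv track=rewrite | github.com/gaurav-singh-au16/Online-Judges | Binary_Search_Problems/vowels_consonents.py | solve
-- ===== SOURCE A (Python) =====
-- def solve(s):
--     vow = ""
--     cons = ""
--     for ch in s:
--         if ch in "aeiou":
--             vow +=  ch
--         else:
--             cons += ch
--     a = sorted(vow)
--     b = sorted(cons)
--     ans = "".join(a)+"".join(b)
--     return ans
-- ===== SOURCE B (Python) =====
-- def solve(s):
--     counts = [0] * 128
--     for ch in s:
--         counts[ord(ch)] += 1
--     parts = [v * counts[ord(v)] for v in "aeiou"]
--     parts += [chr(c) * counts[c] for c in range(128) if c not in (97, 101, 105, 111, 117)]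
--     return "".join(parts)
-- ===== Notes on version B (the rewrite author's own statement) =====
-- stated objective: faster
-- what changed: Replaced the two comparison sorts of the partitioned string by a single counting pass over a 128-slot table, emitting vowels then consonants in code-point order (counting sort).
import Mathlib
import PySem

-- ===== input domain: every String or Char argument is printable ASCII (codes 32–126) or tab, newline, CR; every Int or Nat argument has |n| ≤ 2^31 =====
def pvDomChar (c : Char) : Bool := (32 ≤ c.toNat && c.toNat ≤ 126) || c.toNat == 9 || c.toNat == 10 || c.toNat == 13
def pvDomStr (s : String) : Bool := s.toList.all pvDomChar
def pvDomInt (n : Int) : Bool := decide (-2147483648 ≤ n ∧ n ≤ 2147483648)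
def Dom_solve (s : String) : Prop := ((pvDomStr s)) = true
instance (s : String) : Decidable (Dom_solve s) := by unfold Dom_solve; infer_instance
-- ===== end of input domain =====

-- B replaces A's two comparison sorts by a single counting pass over a 128-slot table (counting sort over the byte alphabet).

-- ===== PORT A =====
def solve (s : String) : String :=
  let acc := s.toList.foldl
    (fun (acc : List Char × List Char) ch =>
      if ch ∈ ['a', 'e', 'i', 'o', 'u'] then (acc.1 ++ [ch], acc.2) else (acc.1, acc.2 ++ [ch]))
    ([], [])
  let a := PySem.List.sorted acc.1 (fun x => x) false
  let b := PySem.List.sorted acc.2 (fun x => x) false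
  String.ofList a ++ String.ofList b

-- ===== PORT B =====
def solve_alt (s : String) : String :=
  let counts := s.toList.foldl
    (fun (cnt : List Nat) ch => cnt.set ch.toNat (cnt.getD ch.toNat 0 + 1))
    (List.replicate 128 0)
  let parts :=
    (['a', 'e', 'i', 'o', 'u'].map (fun v => List.replicate (counts.getD v.toNat 0) v))
    ++ (((List.range 128).filter (fun c => decide (c ∉ [97, 101, 105, 111, 117]))).map
        (fun c => List.replicate (counts.getD c 0) (Char.ofNat c)))
  String.ofList parts.flatten

-- ===== PRECONDITION & SPEC =====
def Spec_solve (s : String) (out : String) : Prop := out = solve_alt s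
instance (s : String) (out : String) : Decidable (Spec_solve s out) := by unfold Spec_solve; infer_instance

-- ===== CLAIM (what is proved, stated in full; the proofs are below) =====
def Claim_equal_solve : Prop := ∀ (s : String), Dom_solve s → Spec_solve s (solve s)

-- ===== LEMMAS AND PROOFS =====

theorem char_lt_iff (a b : Char) : a < b ↔ a.toNat < b.toNat := by
  rw [Char.lt_def, UInt32.lt_iff_toNat_lt]; rfl

theorem toNat_ofNat_of_lt (n : Nat) (h : n < 128) : (Char.ofNat n).toNat = n := by
  have : n.isValidChar := Or.inl (by omega)
  simp [Char.ofNat, this]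

-- A's partition loop, characterised as two filters.
theorem partition_fold (l v c : List Char) :
    l.foldl
      (fun (acc : List Char × List Char) ch =>
        if ch ∈ ['a', 'e', 'i', 'o', 'u'] then (acc.1 ++ [ch], acc.2) else (acc.1, acc.2 ++ [ch]))
      (v, c)
    = (v ++ l.filter (fun ch => decide (ch ∈ ['a', 'e', 'i', 'o', 'u'])),
       c ++ l.filter (fun ch => !decide (ch ∈ ['a', 'e', 'i', 'o', 'u']))) := by
  induction l generalizing v c with
  | nil => simp
  | cons h t ih =>
    simp only [List.foldl_cons]
    by_cases hv' : h ∈ ['a', 'e', 'i', 'o', 'u']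
    · rw [if_pos hv', ih]
      simp only [List.mem_cons, List.not_mem_nil, or_false] at hv'
      simp [List.filter_cons]
      tauto
    · rw [if_neg hv', ih]
      simp only [List.mem_cons, List.not_mem_nil, or_false] at hv'
      simp [List.filter_cons]
      tauto

-- B's counting loop: slot c holds the number of occurrences of the character with code c.
theorem counts_fold (l : List Char) (cnt : List Nat) (hlen : cnt.length = 128)
    (hl : ∀ ch ∈ l, ch.toNat < 128) (c : Nat) (hc : c < 128) :
    (l.foldl (fun (cnt : List Nat) ch => cnt.set ch.toNat (cnt.getD ch.toNat 0 + 1)) cnt).getD c 0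
      = cnt.getD c 0 + l.count (Char.ofNat c) := by
  induction l generalizing cnt with
  | nil => simp
  | cons ch t ih =>
    have hch : ch.toNat < 128 := hl ch (List.mem_cons_self)
    simp only [List.foldl_cons]
    rw [ih _ (by simp [hlen]) (fun x hx => hl x (List.mem_cons_of_mem _ hx))]
    have hset : (cnt.set ch.toNat (cnt.getD ch.toNat 0 + 1)).getD c 0
        = if ch.toNat = c then cnt.getD c 0 + 1 else cnt.getD c 0 := by
      simp only [List.getD_eq_getElem?_getD, List.getElem?_set]
      split <;> simp_all
    by_cases hec : ch.toNat = c
    · have hch' : ch = Char.ofNat c := by rw [← hec, Char.ofNat_toNat]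
      rw [hset, if_pos hec, ← hch', List.count_cons_self]
      omega
    · have hne : Char.ofNat c ≠ ch := fun h => hec (by rw [← h, toNat_ofNat_of_lt c hc])
      rw [hset, if_neg hec, List.count_cons_of_ne (Ne.symm hne)]

-- A concatenation of constant blocks over strictly increasing characters is sorted.
theorem flat_pairwise (cs : List Char) (f : Char → Nat) (h : cs.Pairwise (· < ·)) :
    ((cs.map (fun c => List.replicate (f c) c)).flatten).Pairwise (· ≤ ·) := by
  induction cs with
  | nil => simp
  | cons c t ih =>
    rw [List.pairwise_cons] at h
    simp only [List.map_cons, List.flatten_cons]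
    rw [List.pairwise_append]
    refine ⟨by simp [List.pairwise_replicate], ih h.2, ?_⟩
    intro x hx y hy
    obtain ⟨lb, hlb, hylb⟩ := List.mem_flatten.mp hy
    obtain ⟨c2, hc2, hfc⟩ := List.mem_map.mp hlb
    rw [← hfc] at hylb
    have hxe : x = c := List.eq_of_mem_replicate hx
    have hye : y = c2 := List.eq_of_mem_replicate hylb
    rw [hxe, hye]
    exact le_of_lt (h.1 c2 hc2)

-- Occurrence count in such a block concatenation.
theorem flat_count (cs : List Char) (f : Char → Nat) (h : cs.Nodup) (x : Char) :
    ((cs.map (fun c => List.replicate (f c) c)).flatten).count x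
      = if x ∈ cs then f x else 0 := by
  induction cs with
  | nil => simp
  | cons c t ih =>
    rw [List.nodup_cons] at h
    simp only [List.map_cons, List.flatten_cons, List.count_append, List.count_replicate]
    rw [ih h.2]
    by_cases hxc : x = c
    · subst hxc
      simp [h.1]
    · simp [hxc, Ne.symm hxc, List.mem_cons]

-- Python's sorted on a list drawn from the strictly increasing alphabet cs IS the block concatenation.
theorem sorted_flat (cs l : List Char) (hp : cs.Pairwise (· < ·)) (hmem : ∀ x ∈ l, x ∈ cs) :
    PySem.List.sorted l (fun x => x) false
      = ((cs.map (fun c => List.replicate (l.count c) c)).flatten) := by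
  have hnd : cs.Nodup := hp.imp ne_of_lt
  apply PySem.List.sorted_id_eq_of_perm_of_pairwise
  · rw [List.perm_iff_count]
    intro x
    rw [flat_count cs _ hnd x]
    by_cases hx : x ∈ cs
    · simp [hx]
    · simp [hx, List.count_eq_zero.mpr (fun hxl => hx (hmem x hxl))]
  · exact flat_pairwise cs _ hp

theorem cons_codes_pairwise :
    (((List.range 128).filter (fun c => decide (c ∉ [97, 101, 105, 111, 117]))).map
      Char.ofNat).Pairwise (· < ·) := by
  have h2 : ((List.range 128).filter
      (fun c => decide (c ∉ [97, 101, 105, 111, 117]))).Pairwise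
      (fun a b => Char.ofNat a < Char.ofNat b) := by
    refine List.Pairwise.imp_of_mem ?_ (List.Pairwise.filter _ List.pairwise_lt_range)
    intro a b ha hb hab
    have ha' : a < 128 := List.mem_range.mp (List.mem_of_mem_filter ha)
    have hb' : b < 128 := List.mem_range.mp (List.mem_of_mem_filter hb)
    rw [char_lt_iff, toNat_ofNat_of_lt a ha', toNat_ofNat_of_lt b hb']
    exact hab
  exact List.Pairwise.map _ (fun a b h => h) h2

-- ===== VERDICT (by name: the statement is the Claim_ definition above) =====
theorem solve_spec : Claim_equal_solve := by
  unfold Claim_equal_solve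
  intro s hdom
  unfold Spec_solve solve solve_alt
  have hl : ∀ ch ∈ s.toList, ch.toNat < 128 := by
    intro ch hch
    unfold Dom_solve pvDomStr at hdom
    have := List.all_eq_true.mp hdom ch hch
    unfold pvDomChar at this
    simp at this
    omega
  simp only []
  rw [partition_fold]
  simp only [List.nil_append]
  set l := s.toList with hls
  set vl := l.filter (fun ch => decide (ch ∈ ['a', 'e', 'i', 'o', 'u'])) with hvl
  set cl := l.filter (fun ch => !decide (ch ∈ ['a', 'e', 'i', 'o', 'u'])) with hcl
  set counts := l.foldl (fun (cnt : List Nat) ch => cnt.set ch.toNat (cnt.getD ch.toNat 0 + 1))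
      (List.replicate 128 0) with hcounts
  have hcnt : ∀ c : Nat, c < 128 → counts.getD c 0 = l.count (Char.ofNat c) := by
    intro c hc
    rw [hcounts, counts_fold l _ (by simp) hl c hc]
    simp only [List.getD_eq_getElem?_getD, List.getElem?_replicate, hc, if_pos]
    simp
  -- vowel side
  have hV : PySem.List.sorted vl (fun x => x) false
      = ((['a', 'e', 'i', 'o', 'u'].map
          (fun v => List.replicate (counts.getD v.toNat 0) v)).flatten) := by
    rw [sorted_flat ['a', 'e', 'i', 'o', 'u'] vl (by decide)
      (by intro x hx; rw [hvl] at hx; simpa using (List.mem_filter.mp hx).2)]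
    congr 1
    apply List.map_congr_left
    intro v hv
    congr 1
    have hv128 : v.toNat < 128 := by fin_cases hv <;> decide
    rw [hcnt v.toNat hv128, Char.ofNat_toNat, hvl]
    rw [List.count_filter (by fin_cases hv <;> decide)]
  -- consonant side
  have hC : PySem.List.sorted cl (fun x => x) false
      = ((((List.range 128).filter (fun c => decide (c ∉ [97, 101, 105, 111, 117]))).map
          (fun c => List.replicate (counts.getD c 0) (Char.ofNat c))).flatten) := by
    rw [sorted_flat
      (((List.range 128).filter (fun c => decide (c ∉ [97, 101, 105, 111, 117]))).map Char.ofNat)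
      cl cons_codes_pairwise ?memside]
    · congr 1
      rw [List.map_map]
      apply List.map_congr_left
      intro c hc
      obtain ⟨hcr, hcv⟩ := List.mem_filter.mp hc
      have hc128 : c < 128 := by simpa using hcr
      simp only [Function.comp]
      congr 1
      rw [hcnt c hc128, hcl]
      rw [List.count_filter ?notvow]
      case notvow =>
        simp only [Bool.not_eq_true', decide_eq_false_iff_not]
        intro hmem
        simp only [List.mem_cons, List.not_mem_nil, or_false] at hmem
        have hc' : c = (Char.ofNat c).toNat := (toNat_ofNat_of_lt c hc128).symm
        simp only [decide_eq_true_eq] at hcv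
        apply hcv
        rcases hmem with h | h | h | h | h <;> rw [h] at hc' <;> subst hc' <;> decide
    case memside =>
      intro x hx
      rw [hcl] at hx
      obtain ⟨hxl, hxv⟩ := List.mem_filter.mp hx
      have hx128 : x.toNat < 128 := hl x hxl
      have hxvow : x ∉ ['a', 'e', 'i', 'o', 'u'] := by simpa using hxv
      have hxcode : x.toNat ∉ [97, 101, 105, 111, 117] := by
        intro hmem
        apply hxvow
        have hx' : x = Char.ofNat x.toNat := (Char.ofNat_toNat x).symm
        simp only [List.mem_cons, List.not_mem_nil, or_false] at hmem
        rcases hmem with h | h | h | h | h <;> rw [hx', h] <;> decide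
      refine List.mem_map.mpr ⟨x.toNat, ?_, Char.ofNat_toNat x⟩
      exact List.mem_filter.mpr ⟨by simpa using hx128, by simpa using hxcode⟩
  rw [hV, hC]
  rw [← String.ofList_append]
  congr 1
  rw [List.flatten_append]
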